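-- pv_equiv track=rewrite | github.com/MitchellBerry/PyFactom | FactomWrapper.py | jsonbalances
-- ===== SOURCE A (Python) =====
-- def jsonbalances(balances):
--     try:
--         balances = balances['Response'].split()
--         factoids, entrycredits = {}, {}
--         i = 2
--         while balances[i] + balances[i+1] != 'Entry' + 'Credit':
--             name, address, amount = balances[i], balances[i+1], balances[i+2]
--             factoids[address] = {'Name': name, 'Amount': amount}
--             i += 3
--         while True:
--             i += 3
--             name, address, amount = balances[i], balances[i+1], balances[i+2]
--             entrycredits[address] = {'Name': name, 'Amount': amount}
--     except IndexError:
--         return {'Factoids': factoids, 'EntryCredits': entrycredits}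
-- ===== SOURCE B (Python) =====
-- def jsonbalances(balances):
--     tokens = balances['Response'].split()
--
--     def triples(ts):
--         d = {}
--         while len(ts) >= 3:
--             name, address, amount = ts[0], ts[1], ts[2]
--             d[address] = {'Name': name, 'Amount': amount}
--             ts = ts[3:]
--         return d
--
--     n = len(tokens)
--     j = 2
--     while j + 1 < n and tokens[j] + tokens[j + 1] != 'EntryCredit':
--         j += 3
--     return {'Factoids': triples(tokens[2:j]),
--             'EntryCredits': triples(tokens[j + 3:])}
-- ===== Notes on version B (the rewrite author's own statement) =====
-- stated objective: simpler
-- what changed: Instead of mimicking Python's termination-by-IndexError with two mutating while loops, B first locates the 'Entry Credit' boundary by a bounded scan, then slices the token list into the two regions and builds each dict with one small chunk-by-3 grouping loop.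
import Mathlib
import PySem

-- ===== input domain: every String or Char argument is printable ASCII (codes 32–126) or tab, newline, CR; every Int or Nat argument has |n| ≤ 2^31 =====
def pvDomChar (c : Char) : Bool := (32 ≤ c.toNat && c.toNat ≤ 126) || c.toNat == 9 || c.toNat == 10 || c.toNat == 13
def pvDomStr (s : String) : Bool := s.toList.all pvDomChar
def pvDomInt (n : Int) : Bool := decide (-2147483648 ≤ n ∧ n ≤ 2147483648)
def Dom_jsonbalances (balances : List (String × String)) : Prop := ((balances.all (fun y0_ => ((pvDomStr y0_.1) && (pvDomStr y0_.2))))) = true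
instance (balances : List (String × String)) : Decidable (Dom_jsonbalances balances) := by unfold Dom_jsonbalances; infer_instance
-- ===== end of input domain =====

-- B replaces A's two IndexError-terminated while loops by a boundary scan plus
-- two sliced chunk-by-3 grouping loops (objective: simpler); same return values.


-- ===== PORT A =====
-- first while loop: accumulate factoids until the 'Entry'+'Credit' marker (→ some i)
-- or an IndexError (→ none, the except-branch returns with entrycredits = {})
def aLoop1 (tokens : List String) (factoids : PySem.Dict String (List (String × String))) (i : Nat) :
    PySem.Dict String (List (String × String)) × Option Nat :=
  match _h0 : PySem.List.pyGet? tokens ((i : Nat) : Int), _h1 : PySem.List.pyGet? tokens ((i + 1 : Nat) : Int) with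
  | some t0, some t1 =>
    if t0 ++ t1 = "Entry" ++ "Credit" then (factoids, some i)
    else
      match h2 : PySem.List.pyGet? tokens ((i + 2 : Nat) : Int) with
      | some t2 => aLoop1 tokens (factoids.insert t1 [("Name", t0), ("Amount", t2)]) (i + 3)
      | none => (factoids, none)
  | _, _ => (factoids, none)
termination_by tokens.length - i
decreasing_by
  simp only [PySem.List.pyGet?_natCast] at h2
  obtain ⟨hlt, -⟩ := List.getElem?_eq_some_iff.mp h2
  omega

-- second while loop: i += 3 first each round, stop at the first IndexError
def aLoop2 (tokens : List String) (ec : PySem.Dict String (List (String × String))) (i : Nat) :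
    PySem.Dict String (List (String × String)) :=
  match _g0 : PySem.List.pyGet? tokens ((i + 3 : Nat) : Int), _g1 : PySem.List.pyGet? tokens ((i + 4 : Nat) : Int),
        g2 : PySem.List.pyGet? tokens ((i + 5 : Nat) : Int) with
  | some t0, some t1, some t2 => aLoop2 tokens (ec.insert t1 [("Name", t0), ("Amount", t2)]) (i + 3)
  | _, _, _ => ec
termination_by tokens.length - i
decreasing_by
  simp only [PySem.List.pyGet?_natCast] at g2
  obtain ⟨hlt, -⟩ := List.getElem?_eq_some_iff.mp g2
  omega

def jsonbalances (balances : List (String × String)) : List (String × List (String × List (String × String))) :=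
  match (PySem.Dict.mk balances).get? "Response" with
  | none => []   -- KeyError in Python: excluded by Pre_jsonbalances
  | some resp =>
    let tokens := PySem.Str.split₀ resp
    let r := aLoop1 tokens PySem.Dict.empty 2
    let ec :=
      match r.2 with
      | some i => aLoop2 tokens PySem.Dict.empty i
      | none => PySem.Dict.empty
    [("Factoids", r.1.items), ("EntryCredits", ec.items)]

-- ===== PORT B =====
-- triples: consume the list three at a time, grouping (name, address, amount)
def bTriplesLoop (ts : List String) (d : PySem.Dict String (List (String × String))) :
    PySem.Dict String (List (String × String)) :=
  match ts with
  | name :: address :: amount :: rest =>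
      bTriplesLoop rest (d.insert address [("Name", name), ("Amount", amount)])
  | _ => d

-- boundary scan: while j + 1 < n and tokens[j] + tokens[j+1] != 'EntryCredit': j += 3
def bFind (tokens : List String) (j : Nat) : Nat :=
  if j + 1 < tokens.length then
    if PySem.List.pyGetD tokens ((j : Nat) : Int) "" ++ PySem.List.pyGetD tokens ((j + 1 : Nat) : Int) "" ≠ "EntryCredit"
    then bFind tokens (j + 3)
    else j
  else j
termination_by tokens.length - j

def jsonbalances_alt (balances : List (String × String)) : List (String × List (String × List (String × String))) :=
  match (PySem.Dict.mk balances).get? "Response" with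
  | none => []   -- KeyError in Python: excluded by Pre_jsonbalances
  | some resp =>
    let tokens := PySem.Str.split₀ resp
    let j := bFind tokens 2
    [("Factoids", (bTriplesLoop (PySem.List.slice tokens (some ((2 : Nat) : Int)) (some ((j : Nat) : Int))) PySem.Dict.empty).items),
     ("EntryCredits", (bTriplesLoop (PySem.List.slice tokens (some ((j + 3 : Nat) : Int)) none) PySem.Dict.empty).items)]

-- ===== PRECONDITION & SPEC =====
-- Pre_ excludes exactly the inputs without a 'Response' key, on which A raises KeyError.
def Pre_jsonbalances (balances : List (String × String)) : Prop :=
  ((PySem.Dict.mk balances).get? "Response").isSome = true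
instance (balances : List (String × String)) : Decidable (Pre_jsonbalances balances) := by
  unfold Pre_jsonbalances; infer_instance

def pvWitness_jsonbalances : (List (String × String)) :=
  [("Response", "Factoid Balances nm FA1 10 Entry Credit Balances nm2 EC1 7")]

def Spec_jsonbalances (balances : List (String × String)) (out : List (String × List (String × List (String × String)))) : Prop := out = jsonbalances_alt balances
instance (balances : List (String × String)) (out : List (String × List (String × List (String × String)))) : Decidable (Spec_jsonbalances balances out) := by unfold Spec_jsonbalances; infer_instance

-- ===== CLAIM (what is proved, stated in full; the proofs are below) =====
def Claim_equal_jsonbalances : Prop := ∀ (balances : List (String × String)), Dom_jsonbalances balances → Pre_jsonbalances balances → Spec_jsonbalances balances (jsonbalances balances)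

-- ===== LEMMAS AND PROOFS =====

theorem bTriplesLoop_short (ts : List String) (d : PySem.Dict String (List (String × String)))
    (h : ts.length < 3) : bTriplesLoop ts d = d := by
  match ts with
  | [] => rfl
  | [_] => rfl
  | [_, _] => rfl
  | _ :: _ :: _ :: _ => simp only [List.length_cons] at h; omega

theorem bFind_ge (tokens : List String) (j : Nat) : j ≤ bFind tokens j := by
  fun_induction bFind tokens j with
  | case1 _ _ _ ih => omega
  | case2 => omega
  | case3 => omega

theorem bFind_gd (tokens : List String) (j : Nat) (h : j < tokens.length) :
    PySem.List.pyGetD tokens ((j : Nat) : Int) "" = tokens[j] := by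
  rw [PySem.List.pyGetD_natCast]
  exact List.getD_eq_getElem tokens "" h

theorem bFind_stop_out (tokens : List String) (j : Nat) (h : ¬ j + 1 < tokens.length) :
    bFind tokens j = j := by
  rw [bFind]
  simp [h]

theorem bFind_stop_found (tokens : List String) (j : Nat) (h : j + 1 < tokens.length)
    (heq : tokens[j] ++ tokens[j + 1] = "EntryCredit") : bFind tokens j = j := by
  rw [bFind, bFind_gd tokens j (by omega), bFind_gd tokens (j + 1) h]
  simp [h, heq]

theorem bFind_step (tokens : List String) (j : Nat) (h : j + 1 < tokens.length)
    (hne : tokens[j] ++ tokens[j + 1] ≠ "EntryCredit") : bFind tokens j = bFind tokens (j + 3) := by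
  rw [bFind, bFind_gd tokens j (by omega), bFind_gd tokens (j + 1) h]
  simp [h, hne]

theorem aLoop1_eq (tokens : List String) (d : PySem.Dict String (List (String × String))) (i : Nat) :
    aLoop1 tokens d i =
      (bTriplesLoop ((tokens.drop i).take (bFind tokens i - i)) d,
       if bFind tokens i + 1 < tokens.length then some (bFind tokens i) else none) := by
  fun_induction aLoop1 tokens d i with
  | case1 f i t0 t1 h0 h1 heq =>
    simp only [PySem.List.pyGet?_natCast] at h0 h1
    obtain ⟨hi0, e0⟩ := List.getElem?_eq_some_iff.mp h0
    obtain ⟨hi1, e1⟩ := List.getElem?_eq_some_iff.mp h1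
    have hb : bFind tokens i = i := bFind_stop_found tokens i hi1 (by rw [e0, e1]; exact heq)
    simp [hb, hi1, bTriplesLoop]
  | case2 f i t0 t1 h0 h1 hne t2 h2 ih =>
    simp only [PySem.List.pyGet?_natCast] at h0 h1 h2
    obtain ⟨hi0, e0⟩ := List.getElem?_eq_some_iff.mp h0
    obtain ⟨hi1, e1⟩ := List.getElem?_eq_some_iff.mp h1
    obtain ⟨hi2, e2⟩ := List.getElem?_eq_some_iff.mp h2
    have hb : bFind tokens i = bFind tokens (i + 3) :=
      bFind_step tokens i hi1 (by rw [e0, e1]; exact hne)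
    have hge : i + 3 ≤ bFind tokens (i + 3) := bFind_ge tokens (i + 3)
    have d3 : tokens.drop i = t0 :: t1 :: t2 :: tokens.drop (i + 3) := by
      rw [List.drop_eq_getElem_cons hi0]
      rw [List.drop_eq_getElem_cons hi1]
      rw [show i + 1 + 1 = i + 2 from rfl, List.drop_eq_getElem_cons hi2]
      rw [e0, e1, e2]
    rw [ih, d3, show bFind tokens i - i = bFind tokens (i + 3) - (i + 3) + 1 + 1 + 1 from by omega]
    rw [List.take_succ_cons, List.take_succ_cons, List.take_succ_cons, hb]
    conv_rhs => rw [bTriplesLoop]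
  | case3 f i t0 t1 h0 h1 hne h2 =>
    simp only [PySem.List.pyGet?_natCast] at h0 h1 h2
    obtain ⟨hi0, e0⟩ := List.getElem?_eq_some_iff.mp h0
    obtain ⟨hi1, e1⟩ := List.getElem?_eq_some_iff.mp h1
    have hlen : tokens.length ≤ i + 2 := by
      by_contra hc
      rw [List.getElem?_eq_getElem (by omega)] at h2
      simp at h2
    have hb3 : bFind tokens (i + 3) = i + 3 := bFind_stop_out tokens (i + 3) (by omega)
    have hb : bFind tokens i = i + 3 := by
      rw [bFind_step tokens i hi1 (by rw [e0, e1]; exact hne), hb3]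
    rw [hb]
    rw [bTriplesLoop_short _ _ (by simp only [List.length_take, List.length_drop]; omega)]
    simp
    omega
  | case4 f i hm =>
    have hlen : ¬ (i + 1 < tokens.length) := by
      intro hc
      exact hm tokens[i] tokens[i + 1]
        (by rw [PySem.List.pyGet?_natCast]; exact List.getElem?_eq_getElem (by omega))
        (by rw [PySem.List.pyGet?_natCast]; exact List.getElem?_eq_getElem hc)
    have hb : bFind tokens i = i := bFind_stop_out tokens i hlen
    simp [hb, hlen, bTriplesLoop]

theorem aLoop2_eq (tokens : List String) (ec : PySem.Dict String (List (String × String))) (i : Nat) :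
    aLoop2 tokens ec i = bTriplesLoop (tokens.drop (i + 3)) ec := by
  fun_induction aLoop2 tokens ec i with
  | case1 ec i t0 t1 t2 g0 g1 g2 ih =>
    simp only [PySem.List.pyGet?_natCast] at g0 g1 g2
    obtain ⟨h0, e0⟩ := List.getElem?_eq_some_iff.mp g0
    obtain ⟨h1, e1⟩ := List.getElem?_eq_some_iff.mp g1
    obtain ⟨h2, e2⟩ := List.getElem?_eq_some_iff.mp g2
    have d3 : tokens.drop (i + 3) = t0 :: t1 :: t2 :: tokens.drop (i + 6) := by
      rw [List.drop_eq_getElem_cons h0]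
      rw [show i + 3 + 1 = i + 4 from rfl, List.drop_eq_getElem_cons h1]
      rw [show i + 4 + 1 = i + 5 from rfl, List.drop_eq_getElem_cons h2]
      rw [e0, e1, e2]
    rw [ih, d3]
    conv_rhs => rw [bTriplesLoop]
  | case2 ec i hm =>
    have hlen : tokens.length ≤ i + 5 := by
      by_contra hc
      push Not at hc
      exact hm tokens[i + 3] tokens[i + 4] tokens[i + 5]
        (by rw [PySem.List.pyGet?_natCast]; exact List.getElem?_eq_getElem (by omega))
        (by rw [PySem.List.pyGet?_natCast]; exact List.getElem?_eq_getElem (by omega))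
        (by rw [PySem.List.pyGet?_natCast]; exact List.getElem?_eq_getElem (by omega))
    rw [bTriplesLoop_short _ _ (by simp only [List.length_drop]; omega)]

-- ===== VERDICT (by name: the statement is the Claim_ definition above) =====
theorem jsonbalances_spec : Claim_equal_jsonbalances := by
  intro balances _ _
  unfold Spec_jsonbalances jsonbalances jsonbalances_alt
  cases hr : (PySem.Dict.mk balances).get? "Response" with
  | none => rfl
  | some resp =>
    simp only
    rw [aLoop1_eq]
    rw [PySem.List.slice_natCast, PySem.List.slice_from_natCast]
    by_cases hc : bFind (PySem.Str.split₀ resp) 2 + 1 < (PySem.Str.split₀ resp).length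
    · simp [hc, aLoop2_eq]
    · have hnil : List.drop (bFind (PySem.Str.split₀ resp) 2 + 3) (PySem.Str.split₀ resp) = [] :=
        List.drop_eq_nil_of_le (by omega)
      simp [hc, hnil, bTriplesLoop]
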